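-- pv_equiv track=rewrite | github.com/Kevin-19771977/Calculus-Visual-Lab-FTC-Teacher-Instructional-Platform | app.py | convert_absolute_bars
-- ===== SOURCE A (Python) =====
-- def convert_absolute_bars(expr: str) -> str:
--     """Convert paired |...| into abs(...)."""
--     result = []
--     open_bar = True
--     for ch in expr:
--         if ch == '|':
--             if open_bar:
--                 result.append('abs(')
--             else:
--                 result.append(')')
--             open_bar = not open_bar
--         else:
--             result.append(ch)
--     if not open_bar:
--         raise ValueError('絕對值符號 | | 未成對出現')
--     return ''.join(result)
-- ===== SOURCE B (Python) =====
-- def convert_absolute_bars(expr: str) -> str: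
--     """Convert paired |...| into abs(...) by splitting on '|' and rejoining
--     with alternating 'abs(' / ')' separators."""
--     parts = expr.split('|')
--     if (len(parts) - 1) % 2 == 1:
--         raise ValueError('絕對值符號 | | 未成對出現')
--     pieces = [parts[0]]
--     for i, part in enumerate(parts[1:]):
--         pieces.append('abs(' if i % 2 == 0 else ')')
--         pieces.append(part)
--     return ''.join(pieces)
-- ===== Notes on version B (the rewrite author's own statement) =====
-- stated objective: faster
-- what changed: Replaces A's per-character Python loop with a toggled flag by one split('|') plus a rejoin that interleaves the segments with alternating 'abs(' / ')' separators (parity check on the segment count replaces the final open-flag check); split/join run in C, removing the per-character interpreter work.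
import Mathlib
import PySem

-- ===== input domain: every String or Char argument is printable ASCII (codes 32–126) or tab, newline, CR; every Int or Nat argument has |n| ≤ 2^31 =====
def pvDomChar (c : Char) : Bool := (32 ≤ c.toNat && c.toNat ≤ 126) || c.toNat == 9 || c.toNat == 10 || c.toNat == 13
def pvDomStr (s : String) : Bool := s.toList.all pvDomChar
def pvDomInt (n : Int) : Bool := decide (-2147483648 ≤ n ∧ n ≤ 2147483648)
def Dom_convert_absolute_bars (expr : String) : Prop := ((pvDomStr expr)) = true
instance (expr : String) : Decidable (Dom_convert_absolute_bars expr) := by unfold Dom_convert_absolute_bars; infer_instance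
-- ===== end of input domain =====

-- B rebuilds the string from split('|') segments with alternating separators instead of A's
-- per-character scan with a toggled flag; equal return values proved on even pipe counts (A raises otherwise).

-- ===== PORT A =====
-- one loop step of A: append 'abs(' / ')' toggling open_bar on '|', else append the char
def pvStepA (st : List (List Char) × Bool) (ch : Char) : List (List Char) × Bool :=
  if ch = '|' then
    (if st.2 then (st.1 ++ [['a','b','s','(']], !st.2) else (st.1 ++ [[')']], !st.2))
  else (st.1 ++ [[ch]], st.2)

-- A raises ValueError when the final open_bar is false (odd pipe count); those inputs are outside
-- Pre_; on them this port just returns the join of the accumulated pieces.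
def convert_absolute_bars (expr : String) : String :=
  let st := expr.toList.foldl pvStepA ([], true)
  String.ofList (PySem.Chars.join [] st.1)

-- ===== PORT B =====
-- one loop step of B: append the alternating separator (by index parity), then the segment
def pvStepB (acc : List (List Char)) (ip : Int × List Char) : List (List Char) :=
  acc ++ [if PySem.Int.mod ip.1 2 = 0 then ['a','b','s','('] else [')']] ++ [ip.2]

-- B raises on odd pipe counts (same message as A); those inputs are outside Pre_.
def convert_absolute_bars_alt (expr : String) : String :=
  let parts := PySem.Chars.splitOn expr.toList ['|']
  match parts with
  | [] => ""   -- unreachable: split always yields at least one segment (totality guard)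
  | p :: rest =>
    let pieces := (PySem.List.enumerate rest 0).foldl pvStepB [p]
    String.ofList (PySem.Chars.join [] pieces)

-- ===== PRECONDITION & SPEC =====
-- Pre_ admits exactly the inputs on which Python A returns: an even number of '|' characters
-- (on an odd count A raises ValueError, and so does B).
def Pre_convert_absolute_bars (expr : String) : Prop := expr.toList.count '|' % 2 = 0
instance (expr : String) : Decidable (Pre_convert_absolute_bars expr) := by
  unfold Pre_convert_absolute_bars; infer_instance

def pvWitness_convert_absolute_bars : String := "|x-1|+2"

def Spec_convert_absolute_bars (expr : String) (out : String) : Prop := out = convert_absolute_bars_alt expr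
instance (expr : String) (out : String) : Decidable (Spec_convert_absolute_bars expr out) := by
  unfold Spec_convert_absolute_bars; infer_instance

-- ===== CLAIM (what is proved, stated in full; the proofs are below) =====
def Claim_equal_convert_absolute_bars : Prop := ∀ (expr : String), Dom_convert_absolute_bars expr → Pre_convert_absolute_bars expr → Spec_convert_absolute_bars expr (convert_absolute_bars expr)

-- ===== LEMMAS AND PROOFS =====

-- the common value: expr with each '|' replaced by an alternating 'abs(' / ')'
def pvAbsSpec : List Char → Bool → List Char
  | [], _ => []
  | c :: t, b =>
    if c = '|' then (if b then ['a','b','s','('] else [')']) ++ pvAbsSpec t (!b)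
    else c :: pvAbsSpec t b

-- a structural recursion computing splitOn on '|'
def pvSplit : List Char → List Char → List (List Char)
  | [], cur => [cur.reverse]
  | c :: t, cur => if c = '|' then cur.reverse :: pvSplit t [] else pvSplit t (c :: cur)

-- B's rejoin, as a structural recursion over the tail segments
def pvTailComb : List (List Char) → Bool → List Char
  | [], _ => []
  | q :: r, b => (if b then ['a','b','s','('] else [')']) ++ q ++ pvTailComb r (!b)

theorem pvJoin_nil_flatten (l : List (List Char)) : PySem.Chars.join [] l = l.flatten := by
  induction l with
  | nil => rfl
  | cons h t ih =>
    cases t with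
    | nil => simp [PySem.Chars.join, List.intercalate]
    | cons h2 t2 => rw [PySem.Chars.join_cons_cons, ih]; simp

theorem pvGo_spec : ∀ (fuel : Nat) (l cur : List Char) (acc : List (List Char)),
    l.length < fuel →
    PySem.Chars.splitOn.go ['|'] fuel l cur acc = acc.reverse ++ pvSplit l cur := by
  intro fuel
  induction fuel with
  | zero => intro l cur acc h; omega
  | succ n ih =>
    intro l cur acc h
    cases l with
    | nil => simp [PySem.Chars.splitOn.go, pvSplit]
    | cons c t =>
      simp only [PySem.Chars.splitOn.go]
      by_cases hc : c = '|'
      · subst hc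
        simp only [List.isPrefixOf, pvSplit]
        simp [ih t [] _ (by simpa using Nat.lt_of_succ_lt_succ (by simpa using h))]
      · have hpre : List.isPrefixOf ['|'] (c :: t) = false := by
          simp [List.isPrefixOf]; intro h'; exact absurd h'.symm hc
        simp [hpre, pvSplit, hc,
          ih t (c :: cur) acc (by simpa using Nat.lt_of_succ_lt_succ (by simpa using h))]

theorem pvSplitOn_eq (cs : List Char) :
    PySem.Chars.splitOn cs ['|'] = pvSplit cs [] := by
  simp [PySem.Chars.splitOn, pvGo_spec (cs.length + 1) cs [] [] (by omega)]

theorem pvSplit_ne_nil : ∀ (cs cur : List Char), pvSplit cs cur ≠ [] := by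
  intro cs
  induction cs with
  | nil => intro cur; simp [pvSplit]
  | cons c t ih => intro cur; by_cases hc : c = '|' <;> simp [pvSplit, hc, ih]

-- A's loop computes pvAbsSpec
theorem pvA_fold : ∀ (cs : List Char) (acc : List (List Char)) (b : Bool),
    ((cs.foldl pvStepA (acc, b)).1).flatten = acc.flatten ++ pvAbsSpec cs b := by
  intro cs
  induction cs with
  | nil => intro acc b; simp [pvAbsSpec]
  | cons c t ih =>
    intro acc b
    by_cases hc : c = '|'
    · subst hc
      cases b <;> simp [List.foldl_cons, pvStepA, pvAbsSpec, ih]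
    · simp [List.foldl_cons, pvStepA, hc, pvAbsSpec, ih]

-- B's loop computes pvTailComb
theorem pvB_fold : ∀ (rest : List (List Char)) (k : Nat) (acc : List (List Char)),
    ((PySem.List.enumerate rest (k : Int)).foldl pvStepB acc).flatten
      = acc.flatten ++ pvTailComb rest (decide (k % 2 = 0)) := by
  intro rest
  induction rest with
  | nil => intro k acc; simp [PySem.List.enumerate_nil, pvTailComb]
  | cons q r ih =>
    intro k acc
    rw [PySem.List.enumerate_cons]
    have hmod : PySem.Int.mod (k : Int) 2 = ((k % 2 : Nat) : Int) := by
      exact_mod_cast PySem.Int.mod_natCast k 2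
    have hk1 : ((k : Int) + 1) = ((k + 1 : Nat) : Int) := by push_cast; ring
    rw [List.foldl_cons, hk1, ih (k + 1)]
    by_cases hp : k % 2 = 0
    · have h1 : ¬ ((k + 1) % 2 = 0) := by omega
      have hd : (2 : Int) ∣ (k : Int) := by omega
      simp [pvStepB, hp, h1, hd, pvTailComb]
    · have h1 : (k + 1) % 2 = 0 := by omega
      have hd : ¬ (2 : Int) ∣ (k : Int) := by omega
      simp [pvStepB, hp, h1, hd, pvTailComb]

-- the bridge: splitting then rejoining equals the per-character replacement
theorem pvMain : ∀ (cs cur : List Char) (b : Bool),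
    (match pvSplit cs cur with
      | [] => []
      | p :: rest => p ++ pvTailComb rest b)
      = cur.reverse ++ pvAbsSpec cs b
    ∧ pvTailComb (pvSplit cs cur) b
      = (if b then ['a','b','s','('] else [')']) ++ cur.reverse ++ pvAbsSpec cs (!b) := by
  intro cs
  induction cs with
  | nil =>
    intro cur b
    constructor
    · simp [pvSplit, pvTailComb, pvAbsSpec]
    · simp [pvSplit, pvTailComb, pvAbsSpec]
  | cons c t ih =>
    intro cur b
    by_cases hc : c = '|'
    · subst hc
      have h2 := (ih [] (!b)).2
      have h1 := (ih [] b).2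
      constructor
      · simp only [pvSplit, pvAbsSpec]
        simp [h1]
      · simp only [pvSplit, pvAbsSpec]
        cases b <;> simp_all [pvTailComb]
    · have h1 := (ih (c :: cur) b).1
      have h2 := (ih (c :: cur) b).2
      constructor
      · simp only [pvSplit, if_neg hc, pvAbsSpec]
        simpa [hc] using h1
      · simp only [pvSplit, if_neg hc, pvAbsSpec]
        simpa [hc] using h2

-- ===== VERDICT (by name: the statement is the Claim_ definition above) =====
theorem convert_absolute_bars_spec : Claim_equal_convert_absolute_bars := by
  intro expr _ _
  unfold Spec_convert_absolute_bars convert_absolute_bars convert_absolute_bars_alt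
  rw [pvSplitOn_eq]
  have hA := pvA_fold expr.toList [] true
  cases hsplit : pvSplit expr.toList [] with
  | nil => exact absurd hsplit (pvSplit_ne_nil expr.toList [])
  | cons p rest =>
    have hB := pvB_fold rest 0 [p]
    have hM := (pvMain expr.toList [] true).1
    rw [hsplit] at hM
    simp only [pvJoin_nil_flatten]
    rw [hA]
    simp only [Nat.cast_zero] at hB
    rw [hB]
    simp [hM]
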